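-- pv_equiv track=rewrite | github.com/Owen175/SHA256 | sha256.py | sigma_one
-- ===== SOURCE A (Python) =====
-- def sigma_one(x):
--     right_seventeen = x[-17:] + x[:-17]
--     right_nineteen = x[-19:] + x[:-19]
--     bitwise_shift_10 = '0000000000' + x[:-10]
--     output = ''
--     for s, n, t in zip(right_seventeen, right_nineteen, bitwise_shift_10):
--         if (int(s) + int(n) + int(t)) % 2 == 1:
--             output += '1'
--         else:
--             output += '0'
--     return output
-- ===== SOURCE B (Python) =====
-- def sigma_one(x):
--     # sigma1 of a bitstring: (x rotr 17) XOR (x rotr 19) XOR (x shr 10),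
--     # done as one native integer XOR instead of a per-character parity loop.
--     if not x:
--         return ''
--     n = len(x)
--     rot17 = int(x[-17:] + x[:-17], 2)
--     rot19 = int(x[-19:] + x[:-19], 2)
--     shr10 = int(x, 2) >> 10
--     return format(rot17 ^ rot19 ^ shr10, '0{}b'.format(n))
-- ===== Notes on version B (the rewrite author's own statement) =====
-- stated objective: idiomatic
-- what changed: B converts the rotated/shifted bitstrings to integers with int(s,2), XORs them natively and formats the result back zero-padded, replacing A's per-character parity loop with quadratic string concatenation; Pre_ restricts to bitstrings (binary digit characters only), since int(s,2) raises on other decimal digits on which A still computes a sum-parity value.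
-- outside the precondition, e.g. on sigma_one('22'): A returns '00', B raises ValueError
import Mathlib
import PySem

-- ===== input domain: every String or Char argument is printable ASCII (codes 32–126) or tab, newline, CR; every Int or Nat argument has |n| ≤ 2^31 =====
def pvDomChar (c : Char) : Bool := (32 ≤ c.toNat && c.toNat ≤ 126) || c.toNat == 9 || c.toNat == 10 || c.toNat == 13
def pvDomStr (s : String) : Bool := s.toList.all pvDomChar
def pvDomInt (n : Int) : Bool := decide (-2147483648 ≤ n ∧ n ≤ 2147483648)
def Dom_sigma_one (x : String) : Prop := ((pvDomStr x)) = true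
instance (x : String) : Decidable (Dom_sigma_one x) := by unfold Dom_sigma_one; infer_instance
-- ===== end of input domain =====

-- B replaces A's per-character parity loop by converting the three derived bitstrings to
-- integers, XOR'ing them natively and formatting the result back zero-padded (objective: idiomatic).

-- ===== PORT A =====
-- int(s) for the one-character strings the loop iterates over
def pvIntChar (c : Char) : Int := (PySem.Int.ofChars? [c]).getD 0

def sigma_one (x : String) : String :=
  let l := x.toList
  let right_seventeen := PySem.List.slice l (some (-17)) none ++ PySem.List.slice l none (some (-17))
  let right_nineteen := PySem.List.slice l (some (-19)) none ++ PySem.List.slice l none (some (-19))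
  let bitwise_shift_10 := "0000000000".toList ++ PySem.List.slice l none (some (-10))
  let output := (right_seventeen.zip (right_nineteen.zip bitwise_shift_10)).foldl
    (fun output snt =>
      if PySem.Int.mod (pvIntChar snt.1 + pvIntChar snt.2.1 + pvIntChar snt.2.2) 2 == 1
      then output ++ ['1'] else output ++ ['0'])
    []
  String.ofList output

-- ===== PORT B =====
-- int(s, 2): exact on strings of '0'/'1' (all that Pre_ admits; elsewhere int raises ValueError)
def pvBinVal (l : List Char) : Nat := l.foldl (fun a c => 2 * a + (if c == '1' then 1 else 0)) 0

-- format(v, '0{}b'.format(n)): the n-character zero-padded binary form; exact for v < 2^n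
def pvRend : Nat → Nat → List Char
  | 0, _ => []
  | n + 1, v => pvRend n (v / 2) ++ [if v % 2 == 1 then '1' else '0']

def sigma_one_alt (x : String) : String :=
  let l := x.toList
  if l = [] then "" else
    let rot17 := pvBinVal (PySem.List.slice l (some (-17)) none ++ PySem.List.slice l none (some (-17)))
    let rot19 := pvBinVal (PySem.List.slice l (some (-19)) none ++ PySem.List.slice l none (some (-19)))
    let shr10 := pvBinVal l >>> 10
    String.ofList (pvRend l.length (rot17 ^^^ rot19 ^^^ shr10))

-- ===== PRECONDITION & SPEC =====
-- A calls int() on each character (ValueError unless a decimal digit); B's int(s,2) additionally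
-- raises ValueError on decimal digits that are not binary digits (on which A still returns a
-- sum-parity string), so Pre_ admits exactly the bitstrings the function is for.
def Pre_sigma_one (x : String) : Prop := (x.toList.all (fun c => c ∈ ['0', '1'])) = true
instance (x : String) : Decidable (Pre_sigma_one x) := by unfold Pre_sigma_one; infer_instance

def pvWitness_sigma_one : String := "01"

def Spec_sigma_one (x : String) (out : String) : Prop := out = sigma_one_alt x
instance (x : String) (out : String) : Decidable (Spec_sigma_one x out) := by unfold Spec_sigma_one; infer_instance

-- ===== CLAIM (what is proved, stated in full; the proofs are below) =====
def Claim_equal_sigma_one : Prop := ∀ (x : String), Dom_sigma_one x → Pre_sigma_one x → Spec_sigma_one x (sigma_one x)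

-- ===== LEMMAS AND PROOFS =====

lemma tb_dm (x i : Nat) : x.testBit i = decide (x / 2 ^ i % 2 = 1) := by
  rw [Nat.testBit, Nat.shiftRight_eq_div_pow]
  rcases Nat.mod_two_eq_zero_or_one (x / 2 ^ i) with h | h <;> simp [h]

lemma binFold_shift (l : List Char) (a : Nat) :
    l.foldl (fun a c => 2 * a + (if c == '1' then 1 else 0)) a = a * 2 ^ l.length + pvBinVal l := by
  induction l generalizing a with
  | nil => simp [pvBinVal]
  | cons c t ih =>
    simp only [List.foldl_cons, pvBinVal, List.length_cons]
    rw [ih, ih (2 * 0 + _)]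
    ring

lemma val_cons (c : Char) (t : List Char) :
    pvBinVal (c :: t) = (if c == '1' then 1 else 0) * 2 ^ t.length + pvBinVal t := by
  show List.foldl _ _ _ = _
  rw [List.foldl_cons, binFold_shift]
  norm_num

lemma val_lt (l : List Char) : pvBinVal l < 2 ^ l.length := by
  induction l with
  | nil => simp [pvBinVal]
  | cons c t ih =>
    rw [val_cons]
    have hb : (if c == '1' then 1 else 0) ≤ 1 := by split <;> omega
    simp only [List.length_cons, pow_succ]
    nlinarith

lemma testBit_val (l : List Char) (j : Nat) (hj : j < l.length) :
    (pvBinVal l).testBit j = (l.getD (l.length - 1 - j) ' ' == '1') := by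
  induction l generalizing j with
  | nil => simp at hj
  | cons c t ih =>
    rw [val_cons]
    set b : Nat := if c == '1' then 1 else 0 with hb
    have hble : b ≤ 1 := by rw [hb]; split <;> omega
    rcases Nat.lt_or_ge j t.length with hjt | hjt
    · -- low bits come from t
      have h1 : (b * 2 ^ t.length + pvBinVal t).testBit j = (pvBinVal t).testBit j := by
        rw [tb_dm, tb_dm]
        have hsplit : b * 2 ^ t.length + pvBinVal t
            = pvBinVal t + 2 ^ j * (b * 2 ^ (t.length - j)) := by
          have : (2 : Nat) ^ j * 2 ^ (t.length - j) = 2 ^ t.length := by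
            rw [← pow_add]; congr 1; omega
          nlinarith [this]
        rw [hsplit, Nat.add_mul_div_left _ _ (pow_pos (by norm_num) j)]
        have h2 : b * 2 ^ (t.length - j) = 2 * (b * 2 ^ (t.length - j - 1)) := by
          have : (2 : Nat) ^ (t.length - j) = 2 * 2 ^ (t.length - j - 1) := by
            rw [← pow_succ']; congr 1; omega
          rw [this]; ring
        rw [h2, Nat.add_mul_mod_self_left]
      rw [h1, ih j hjt]
      have : (c :: t).length - 1 - j = (t.length - 1 - j) + 1 := by
        simp only [List.length_cons]; omega
      rw [this, List.getD_cons_succ]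
    · -- the top bit is c
      have hjm : j = t.length := by simp only [List.length_cons] at hj; omega
      subst hjm
      rw [tb_dm]
      rw [show b * 2 ^ t.length + pvBinVal t = pvBinVal t + 2 ^ t.length * b from by ring,
          Nat.add_mul_div_left _ _ (pow_pos (by norm_num) t.length),
          Nat.div_eq_of_lt (val_lt t), Nat.zero_add]
      have : (c :: t).length - 1 - t.length = 0 := by simp
      rw [this, List.getD_cons_zero, hb]
      by_cases hc : c == '1' <;> simp [hc]

lemma testBit_val_ge (l : List Char) (j : Nat) (hj : l.length ≤ j) :
    (pvBinVal l).testBit j = false :=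
  Nat.testBit_lt_two_pow (lt_of_lt_of_le (val_lt l) (Nat.pow_le_pow_right (by norm_num) hj))

lemma rend_map (n : Nat) : ∀ v, pvRend n v
    = (List.range n).map (fun i => if v.testBit (n - 1 - i) then '1' else '0') := by
  induction n with
  | zero => simp [pvRend]
  | succ n ih =>
    intro v
    rw [pvRend, ih, List.range_succ, List.map_append, List.map_singleton]
    congr 1
    · apply List.map_congr_left
      intro i hi
      rw [List.mem_range] at hi
      have : n + 1 - 1 - i = (n - 1 - i) + 1 := by omega
      rw [this, Nat.testBit_succ]
    · have : n + 1 - 1 - n = 0 := by omega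
      rw [this, Nat.testBit_zero]
      rcases Nat.mod_two_eq_zero_or_one v with h | h <;> simp [h]

-- A's if-parity on binary characters equals the xor of their bit values
lemma parity_char (a b s : Char) (ha : a = '0' ∨ a = '1') (hb : b = '0' ∨ b = '1')
    (hs : s = '0' ∨ s = '1') :
    (if PySem.Int.mod (pvIntChar a + pvIntChar b + pvIntChar s) 2 == 1 then '1' else '0')
      = if ((a == '1') ^^ (b == '1')) ^^ (s == '1') then '1' else '0' := by
  rcases ha with rfl | rfl <;> rcases hb with rfl | rfl <;> rcases hs with rfl | rfl <;> decide

-- bitwise_shift_10, indexed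
lemma sh_getD (l : List Char) (i : Nat) (hi : i < l.length)
    (hlen : i < (List.replicate 10 '0' ++ l.take (l.length - 10)).length) :
    (List.replicate 10 '0' ++ l.take (l.length - 10))[i]'hlen =
      if 10 ≤ i then l.getD (i - 10) ' ' else '0' := by
  rcases Nat.lt_or_ge i 10 with h10 | h10
  · rw [List.getElem_append_left (by simp only [List.length_replicate]; omega)]
    rw [List.getElem_replicate, if_neg (by omega)]
  · rw [List.getElem_append_right (by simp only [List.length_replicate]; omega)]
    rw [if_pos h10]
    simp only [List.length_replicate]
    rw [List.getElem_take, List.getD_eq_getElem l ' ' (by omega)]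

-- length of a rotated-by-slices list
lemma rot_len (l : List Char) (k : Nat) :
    (l.drop (l.length - k) ++ l.take (l.length - k)).length = l.length := by
  simp only [List.length_append, List.length_drop, List.length_take]
  omega

-- every character of a rotated list is a character of l
lemma rot_mem (l : List Char) (k : Nat) (c : Char)
    (hc : c ∈ l.drop (l.length - k) ++ l.take (l.length - k)) : c ∈ l := by
  rcases List.mem_append.mp hc with h | h
  · exact List.mem_of_mem_drop h
  · exact List.mem_of_mem_take h

-- ===== VERDICT (by name: the statement is the Claim_ definition above) =====
theorem sigma_one_spec : Claim_equal_sigma_one := by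
  intro x _ hpre
  unfold Spec_sigma_one
  have hbin : ∀ c ∈ x.toList, c = '0' ∨ c = '1' := by
    simp only [Pre_sigma_one, List.all_eq_true, List.mem_cons, List.not_mem_nil, or_false,
      decide_eq_true_eq] at hpre
    exact hpre
  simp only [sigma_one, sigma_one_alt]
  by_cases hx : x.toList = []
  · rw [if_pos hx]
    simp [hx, PySem.List.slice]
  · rw [if_neg hx]
    rw [PySem.List.slice_from_neg_ofNat x.toList 17 (by omega),
        PySem.List.slice_to_neg_ofNat x.toList 17 (by omega),
        PySem.List.slice_from_neg_ofNat x.toList 19 (by omega),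
        PySem.List.slice_to_neg_ofNat x.toList 19 (by omega),
        PySem.List.slice_to_neg_ofNat x.toList 10 (by omega),
        show "0000000000".toList = List.replicate 10 '0' from by decide]
    set l := x.toList with hl
    set n := l.length with hn
    set L17 := l.drop (n - 17) ++ l.take (n - 17) with hL17
    set L19 := l.drop (n - 19) ++ l.take (n - 19) with hL19
    set S := List.replicate 10 '0' ++ l.take (n - 10) with hS
    rw [show (fun (output : List Char) (snt : Char × Char × Char) =>
          if PySem.Int.mod (pvIntChar snt.1 + pvIntChar snt.2.1 + pvIntChar snt.2.2) 2 == 1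
          then output ++ ['1'] else output ++ ['0'])
        = fun output snt => output ++
            [if PySem.Int.mod (pvIntChar snt.1 + pvIntChar snt.2.1 + pvIntChar snt.2.2) 2 == 1
             then '1' else '0'] from by funext o s; split <;> rfl]
    rw [PySem.List.foldl_append_singleton_eq_map, List.nil_append, rend_map]
    congr 1
    have hL17len : L17.length = n := rot_len l 17
    have hL19len : L19.length = n := rot_len l 19
    have hSlen : S.length = 10 + (n - 10) := by
      simp only [hS, List.length_append, List.length_replicate, List.length_take]
      omega
    apply List.ext_getElem
    · simp only [List.length_map, List.length_zip, List.length_range, hL17len, hL19len, hSlen]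
      omega
    · intro i h1 h2
      have hi : i < n := by
        simp only [List.length_map, List.length_zip, hL17len, hL19len, hSlen] at h1
        omega
      simp only [List.getElem_map, List.getElem_zip, List.getElem_range]
      -- B's bit at position i
      rw [Nat.testBit_xor, Nat.testBit_xor, Nat.testBit_shiftRight]
      have hj : n - 1 - i < n := by omega
      rw [testBit_val L17 _ (by omega), testBit_val L19 _ (by omega)]
      rw [hL17len, hL19len]
      have hidx : n - 1 - (n - 1 - i) = i := by omega
      rw [hidx]
      -- the shifted component
      have hshift : (pvBinVal l).testBit (10 + (n - 1 - i))
          = ((if 10 ≤ i then l.getD (i - 10) ' ' else '0') == '1') := by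
        rcases Nat.lt_or_ge i 10 with h10 | h10
        · rw [testBit_val_ge l _ (by omega), if_neg (by omega)]
          decide
        · rw [testBit_val l _ (by omega), if_pos h10]
          congr 2
          omega
      rw [hshift]
      -- A's character at position i
      rw [sh_getD l i hi]
      -- convert getElem to getD and apply the parity lemma
      rw [List.getD_eq_getElem L17 ' ' (by omega), List.getD_eq_getElem L19 ' ' (by omega)]
      apply parity_char
      · exact hbin _ (rot_mem l 17 _ (List.getElem_mem _))
      · exact hbin _ (rot_mem l 19 _ (List.getElem_mem _))
      · split
        · rw [List.getD_eq_getElem l ' ' (by omega)]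
          exact hbin _ (List.getElem_mem _)
        · left; rfl
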